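-- pv_equiv track=rewrite | github.com/beatenyou/adLDAP | adLDAP.py | _sid_is_privileged
-- ===== SOURCE A (Python) =====
-- _PRIV_RIDS = {'498', '512', '516', '517', '518', '519', '521'}
--
-- _PRIV_BUILTIN_SIDS = {
--     'S-1-5-18',      # SYSTEM
--     'S-1-5-9',       # Enterprise Domain Controllers
--     'S-1-5-32-544',  # Administrators
--     'S-1-5-32-548',  # Account Operators (builtin)
--     'S-1-5-32-549',  # Server Operators
--     'S-1-5-32-550',  # Print Operators
--     'S-1-5-32-551',  # Backup Operators
--     'S-1-5-32-569',  # Cryptographic Operators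
-- }
--
-- def _sid_is_privileged(sid: str, domain_sid: str) -> bool:
--     """Return True if the SID belongs to a well-known privileged group."""
--     if sid in _PRIV_BUILTIN_SIDS:
--         return True
--     if domain_sid:
--         for rid in _PRIV_RIDS:
--             if sid == f'{domain_sid}-{rid}':
--                 return True
--     return False
-- ===== SOURCE B (Python) =====
-- _PRIV_RIDS = {'498', '512', '516', '517', '518', '519', '521'}
--
-- _PRIV_BUILTIN_SIDS = {
--     'S-1-5-18',      # SYSTEM
--     'S-1-5-9',       # Enterprise Domain Controllers
--     'S-1-5-32-544',  # Administrators
--     'S-1-5-32-548',  # Account Operators (builtin)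
--     'S-1-5-32-549',  # Server Operators
--     'S-1-5-32-550',  # Print Operators
--     'S-1-5-32-551',  # Backup Operators
--     'S-1-5-32-569',  # Cryptographic Operators
-- }
--
-- def _sid_is_privileged(sid: str, domain_sid: str) -> bool:
--     """Return True if the SID belongs to a well-known privileged group."""
--     if sid in _PRIV_BUILTIN_SIDS:
--         return True
--     if not domain_sid:
--         return False
--     parts = sid.rsplit('-', 1)
--     if len(parts) != 2:
--         return False
--     prefix, rid = parts
--     return prefix == domain_sid and rid in _PRIV_RIDS
-- ===== Notes on version B (the rewrite author's own statement) =====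
-- stated objective: simpler
-- what changed: Instead of generating the seven candidate strings f'{domain_sid}-{rid}' and comparing each against sid, B parses sid once with rsplit('-', 1) and does a single prefix comparison plus one set-membership lookup on the extracted RID.
import Mathlib
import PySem

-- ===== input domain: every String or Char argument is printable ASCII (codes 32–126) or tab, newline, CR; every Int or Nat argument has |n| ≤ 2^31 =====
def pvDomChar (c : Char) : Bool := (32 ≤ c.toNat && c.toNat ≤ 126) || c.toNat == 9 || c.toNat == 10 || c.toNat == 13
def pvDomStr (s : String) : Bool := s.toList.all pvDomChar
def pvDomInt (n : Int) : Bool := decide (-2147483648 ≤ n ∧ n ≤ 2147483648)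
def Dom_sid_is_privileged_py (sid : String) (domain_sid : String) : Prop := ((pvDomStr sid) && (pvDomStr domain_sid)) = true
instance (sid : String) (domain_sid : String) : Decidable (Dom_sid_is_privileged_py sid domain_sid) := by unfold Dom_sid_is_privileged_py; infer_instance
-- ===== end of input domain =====

-- B replaces A's "build f'{domain_sid}-{rid}' for each of seven RIDs and compare" loop by a single
-- rsplit('-', 1) of the SID followed by one prefix comparison and one RID set-membership test (simpler).
set_option maxRecDepth 2048


-- ===== PORT A =====
-- _PRIV_RIDS (a Python set of string literals; membership / iteration order does not affect the result)
def privRids : List String := ["498", "512", "516", "517", "518", "519", "521"]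
-- _PRIV_BUILTIN_SIDS
def privBuiltinSids : List String :=
  ["S-1-5-18", "S-1-5-9", "S-1-5-32-544", "S-1-5-32-548",
   "S-1-5-32-549", "S-1-5-32-550", "S-1-5-32-551", "S-1-5-32-569"]

def sid_is_privileged_py (sid : String) (domain_sid : String) : Bool :=
  -- if sid in _PRIV_BUILTIN_SIDS: return True
  if privBuiltinSids.contains sid then true
  -- if domain_sid:
  else if domain_sid ≠ "" then
    -- for rid in _PRIV_RIDS: if sid == f'{domain_sid}-{rid}': return True  (early-return loop = any)
    privRids.any (fun rid => sid == domain_sid ++ "-" ++ rid)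
  else false

-- ===== PORT B =====
-- sid.rsplit('-', 1), ported by hand on List Char (exact for the single-character separator '-',
-- maxsplit 1: split at the LAST '-' if any): scan the reversed characters up to the first '-'.
def sid_is_privileged_py_alt (sid : String) (domain_sid : String) : Bool :=
  if privBuiltinSids.contains sid then true
  else if domain_sid = "" then false
  else
    -- parts = sid.rsplit('-', 1)
    let rev := sid.toList.reverse
    let ridRev := rev.takeWhile (fun c => c ≠ '-')
    match rev.dropWhile (fun c => c ≠ '-') with
    | [] => false                      -- len(parts) != 2 (no '-' in sid)
    | _ :: restRev =>
      -- prefix == domain_sid and rid in _PRIV_RIDS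
      (String.ofList restRev.reverse == domain_sid) && privRids.contains (String.ofList ridRev.reverse)

-- ===== PRECONDITION & SPEC =====
def Spec_sid_is_privileged_py (sid : String) (domain_sid : String) (out : Bool) : Prop := out = sid_is_privileged_py_alt sid domain_sid
instance (sid : String) (domain_sid : String) (out : Bool) : Decidable (Spec_sid_is_privileged_py sid domain_sid out) := by unfold Spec_sid_is_privileged_py; infer_instance

-- ===== CLAIM (what is proved, stated in full; the proofs are below) =====
def Claim_equal_sid_is_privileged_py : Prop := ∀ (sid : String) (domain_sid : String), Dom_sid_is_privileged_py sid domain_sid → Spec_sid_is_privileged_py sid domain_sid (sid_is_privileged_py sid domain_sid)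

-- ===== LEMMAS AND PROOFS =====

-- takeWhile/dropWhile across a block of characters all satisfying the predicate followed by a failing one
theorem twdw_split (l rest : List Char) (h : ∀ c ∈ l, c ≠ '-') :
    (l ++ '-' :: rest).takeWhile (fun c => c ≠ '-') = l ∧
    (l ++ '-' :: rest).dropWhile (fun c => c ≠ '-') = '-' :: rest := by
  induction l with
  | nil => simp [List.takeWhile, List.dropWhile]
  | cons a t ih =>
    have ha : (a == '-') = false := by
      have := h a (by simp); simpa using this
    have ih' := ih (fun c hc => h c (by simp [hc]))
    have ha' : decide (a ≠ '-') = true := by simpa using ha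
    simp only [List.cons_append, List.takeWhile_cons, List.dropWhile_cons, ha', if_true,
      ih'.1, ih'.2, and_self]

-- the head of a non-empty dropWhile result fails the predicate
theorem dropWhile_head_fails {p : Char → Bool} (l : List Char) (c : Char) (t : List Char)
    (h : l.dropWhile p = c :: t) : p c = false := by
  induction l with
  | nil => simp at h
  | cons a s ih =>
    by_cases hp : p a
    · exact ih (by simpa [List.dropWhile_cons, hp] using h)
    · simp [List.dropWhile_cons, hp] at h
      simp [← h.1]; simpa using hp

theorem string_eq_iff_toList (a b : String) : a = b ↔ a.toList = b.toList :=
  ⟨fun h => h ▸ rfl, String.toList_inj.mp⟩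

-- core: given domain_sid ≠ '' (and whatever sid), the loop of A and the rsplit of B agree
theorem core (sid d : String) (hd : d ≠ "") :
    privRids.any (fun rid => sid == d ++ "-" ++ rid)
      = (let rev := sid.toList.reverse
         let ridRev := rev.takeWhile (fun c => c ≠ '-')
         match rev.dropWhile (fun c => c ≠ '-') with
         | [] => false
         | _ :: restRev =>
           (String.ofList restRev.reverse == d) && privRids.contains (String.ofList ridRev.reverse)) := by
  simp only []
  rcases hdw : sid.toList.reverse.dropWhile (fun c => c ≠ '-') with _ | ⟨c, restRev⟩
  · -- no '-' in sid: every comparison of A is false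
    simp only [List.any_eq_false]
    intro rid hrid
    have hall : ∀ c ∈ sid.toList.reverse, c ≠ '-' := by
      intro c hc
      have := List.dropWhile_eq_nil_iff.mp hdw c (by simpa using hc)  -- may need adjusting
      simpa using this
    intro hbeq
    have heq : sid = d ++ "-" ++ rid := by exact eq_of_beq hbeq
    have : ('-' : Char) ∈ sid.toList := by
      rw [heq]
      simp [String.toList_append]
    exact hall '-' (by simpa using this) rfl
  · have hc : c = '-' := by
      have := dropWhile_head_fails _ _ _ hdw
      simpa using this
    subst hc
    -- sid.toList.reverse = takeWhile ++ '-' :: restRev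
    have hsplit : sid.toList.reverse
        = sid.toList.reverse.takeWhile (fun c => c ≠ '-') ++ '-' :: restRev := by
      conv_lhs => rw [← List.takeWhile_append_dropWhile (p := fun c => c ≠ '-') (l := sid.toList.reverse)]
      rw [hdw]
    have hridall : ∀ x ∈ sid.toList.reverse.takeWhile (fun c => c ≠ '-'), x ≠ '-' := by
      intro x hx
      have := List.mem_takeWhile_imp hx
      simpa using this
    set tw := sid.toList.reverse.takeWhile (fun c => c ≠ '-') with htw
    -- sid.toList = restRev.reverse ++ '-' :: tw.reverse
    have hsid : sid.toList = restRev.reverse ++ '-' :: tw.reverse := by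
      have := congrArg List.reverse hsplit
      simpa using this
    by_cases hmem : ∃ rid ∈ privRids, sid = d ++ "-" ++ rid
    · obtain ⟨rid, hrid, heq⟩ := hmem
      -- then restRev.reverse = d.toList and tw.reverse = rid.toList
      have hridnd : ∀ c ∈ rid.toList, c ≠ '-' := by
        fin_cases hrid <;> simp
      have hsid2 : sid.toList = d.toList ++ '-' :: rid.toList := by
        rw [heq]; simp [String.toList_append]
      have hrev : sid.toList.reverse = rid.toList.reverse ++ '-' :: d.toList.reverse := by
        rw [hsid2]; simp
      have hsp := twdw_split rid.toList.reverse d.toList.reverse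
        (by intro c hc; exact hridnd c (by simpa using hc))
      have htw' : tw = rid.toList.reverse := by rw [htw, hrev, hsp.1]
      have hrest : restRev = d.toList.reverse := by
        have : ('-' :: restRev) = '-' :: d.toList.reverse := by
          rw [← hdw, hrev, hsp.2]
        simpa using this
      have h1 : String.ofList restRev.reverse = d := by
        rw [hrest]
        apply (string_eq_iff_toList _ _).mpr
        simp
      have h2 : String.ofList tw.reverse = rid := by
        rw [htw']
        apply (string_eq_iff_toList _ _).mpr
        simp
      have hA : privRids.any (fun r => sid == d ++ "-" ++ r) = true := by
        rw [List.any_eq_true]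
        exact ⟨rid, hrid, by simp [heq]⟩
      have hmatch : (match ('-' :: restRev : List Char) with
          | [] => false
          | _ :: r => (String.ofList r.reverse == d) && privRids.contains (String.ofList tw.reverse))
          = ((String.ofList restRev.reverse == d) && privRids.contains (String.ofList tw.reverse)) := rfl
      rw [hA, hmatch, h1, h2]
      simp [List.contains_eq_mem, hrid]
    · -- no match: A's loop is false; show B's result is false too
      have hA : privRids.any (fun r => sid == d ++ "-" ++ r) = false := by
        rw [List.any_eq_false]
        intro r hr hbeq
        exact hmem ⟨r, hr, eq_of_beq hbeq⟩
      have hmatch : (match ('-' :: restRev : List Char) with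
          | [] => false
          | _ :: r => (String.ofList r.reverse == d) && privRids.contains (String.ofList tw.reverse))
          = ((String.ofList restRev.reverse == d) && privRids.contains (String.ofList tw.reverse)) := rfl
      rw [hA, hmatch]
      cases hxy : ((String.ofList restRev.reverse == d) && privRids.contains (String.ofList tw.reverse)) with
      | false => rfl
      | true =>
        exfalso
        obtain ⟨h1', h2'⟩ := Bool.and_eq_true_iff.mp hxy
        have hpre : String.ofList restRev.reverse = d := eq_of_beq h1'
        have hrid : String.ofList tw.reverse ∈ privRids := by
          simpa [List.contains_eq_mem] using h2'
        apply hmem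
        refine ⟨String.ofList tw.reverse, hrid, ?_⟩
        apply (string_eq_iff_toList _ _).mpr
        rw [hsid, ← hpre]
        simp [String.toList_append]

-- ===== VERDICT (by name: the statement is the Claim_ definition above) =====
theorem sid_is_privileged_py_spec : Claim_equal_sid_is_privileged_py := by
  intro sid d _
  unfold Spec_sid_is_privileged_py
  by_cases hb : sid ∈ privBuiltinSids
  · simp [sid_is_privileged_py, sid_is_privileged_py_alt, List.contains_eq_mem, hb]
  · by_cases hd : d = ""
    · simp [sid_is_privileged_py, sid_is_privileged_py_alt, List.contains_eq_mem, hb, hd]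
    · have hcore := core sid d hd
      simp only [sid_is_privileged_py, sid_is_privileged_py_alt, List.contains_eq_mem] at *
      simp [hb, hd]
      simpa using hcore
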